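-- pv_equiv track=rewrite | github.com/ping-shuo-hao/ILP_solver | preprocessing.py | construct_device_distance_matrix
-- ===== SOURCE A (Python) =====
-- from collections import deque
--
-- def construct_device_distance_matrix(list_qubit_neighbors,n):
--   qubit_distance_matrix = [[n for j in range(n)] for i in range(n)]
--   for i in range(n):
--     qubit_distance_matrix[i][i] = 0
--     traverse_set = set()
--     queue = deque()
--     queue.append(i)
--     while len(queue) > 0:
--       q = queue.popleft()
--       traverse_set.add(q)
--       for j in list_qubit_neighbors[q]:
--         if not (j in traverse_set):
--           traverse_set.add(j)
--           qubit_distance_matrix[i][j] = qubit_distance_matrix[i][q] + 1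
--           queue.append(j)
--   return qubit_distance_matrix
-- ===== SOURCE B (Python) =====
-- def construct_device_distance_matrix(list_qubit_neighbors, n):
--     matrix = []
--     for i in range(n):
--         row = [n] * n
--         row[i] = 0
--         for _ in range(n):
--             for q in range(n):
--                 for j in list_qubit_neighbors[q]:
--                     if row[q] + 1 < row[j]:
--                         row[j] = row[q] + 1
--         matrix.append(row)
--     return matrix
-- ===== Notes on version B (the rewrite author's own statement) =====
-- stated objective: alternative
-- what changed: Replaces per-source BFS (deque, visited set, distances propagated from the matrix) with per-source Bellman-Ford relaxation: n rounds that sweep every directed edge q->j and relax row[j] = min(row[j], row[q]+1); no queue and no visited set exist in B.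
-- outside the precondition, e.g. on construct_device_distance_matrix([[1, 0], [-1, 0]], 2): A returns [[0, 2], [2, 1]], B returns [[0, 1], [1, 0]]; on construct_device_distance_matrix([[-1], [0]], 2): A returns [[0, 1], [1, 2]], B returns [[0, 1], [1, 0]]
import Mathlib
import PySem

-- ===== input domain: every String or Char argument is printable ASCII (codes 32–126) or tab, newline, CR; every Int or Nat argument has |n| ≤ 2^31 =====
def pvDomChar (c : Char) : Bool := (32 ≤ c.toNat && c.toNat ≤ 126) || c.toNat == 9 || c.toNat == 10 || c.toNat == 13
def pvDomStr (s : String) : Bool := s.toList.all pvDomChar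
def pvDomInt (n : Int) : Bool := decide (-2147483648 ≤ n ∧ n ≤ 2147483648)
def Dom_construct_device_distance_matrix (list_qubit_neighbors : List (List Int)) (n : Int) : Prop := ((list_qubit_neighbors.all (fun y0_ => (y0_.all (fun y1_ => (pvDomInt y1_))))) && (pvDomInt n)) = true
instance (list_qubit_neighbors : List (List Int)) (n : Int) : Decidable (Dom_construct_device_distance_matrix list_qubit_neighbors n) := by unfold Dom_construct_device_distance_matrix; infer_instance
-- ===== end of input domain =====

-- B replaces A's per-source BFS (deque + visited set, distances read back out of the matrix)
-- by per-source Bellman-Ford relaxation: n rounds sweeping every directed edge q->j and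
-- relaxing row[j] = min(row[j], row[q]+1); objective: alternative algorithm, not faster.

-- ===== PORT A =====
-- body of A's inner 'for j in list_qubit_neighbors[q]' loop (state = (traverse_set, queue, row))
def pvInnerA (q : Int) (st : PySem.Set Int × List Int × List Int) (j : Int) :
    PySem.Set Int × List Int × List Int :=
  if PySem.Set.contains st.1 j then st
  else (PySem.Set.add st.1 j, st.2.1 ++ [j],
        PySem.List.pySetD st.2.2 j (PySem.List.pyGetD st.2.2 q 0 + 1))

-- A's 'while len(queue) > 0' loop.  The fuel argument only makes the recursion total
-- (inside Pre_ it is never exhausted, proved below); on an out-of-range q Python raises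
-- IndexError (excluded by Pre_) and the port just returns the row.
def pvRunA (nbrs : List (List Int)) : Nat → PySem.Set Int → List Int → List Int → List Int
  | 0, _, _, row => row
  | _ + 1, _, [], row => row
  | f + 1, vis, q :: qs, row =>
    let vis' := PySem.Set.add vis q
    match PySem.List.pyGet? nbrs q with
    | none => row
    | some l =>
      let st := l.foldl (pvInnerA q) (vis', qs, row)
      pvRunA nbrs f st.1 st.2.1 st.2.2

def construct_device_distance_matrix (list_qubit_neighbors : List (List Int)) (n : Int) :
    List (List Int) :=
  let m0 := (PySem.List.pyRange 0 n 1).map (fun _ => (PySem.List.pyRange 0 n 1).map (fun _ => n))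
  (PySem.List.pyRange 0 n 1).foldl (fun m i =>
    PySem.List.pySetD m i
      (pvRunA list_qubit_neighbors (n.toNat + 1) PySem.Set.empty [i]
        (PySem.List.pySetD (PySem.List.pyGetD m i []) i 0))) m0

-- ===== PORT B =====
-- body of B's inner 'if row[q] + 1 < row[j]: row[j] = row[q] + 1'
def pvEdgeB (q : Int) (row : List Int) (j : Int) : List Int :=
  if PySem.List.pyGetD row q 0 + 1 < PySem.List.pyGetD row j 0 then
    PySem.List.pySetD row j (PySem.List.pyGetD row q 0 + 1)
  else row

-- B's 'for j in list_qubit_neighbors[q]' loop (an out-of-range q raises IndexError in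
-- Python; excluded by Pre_, the port just returns the row)
def pvNodeB (nbrs : List (List Int)) (row : List Int) (q : Int) : List Int :=
  match PySem.List.pyGet? nbrs q with
  | none => row
  | some l => l.foldl (pvEdgeB q) row

def construct_device_distance_matrix_alt (list_qubit_neighbors : List (List Int)) (n : Int) :
    List (List Int) :=
  (PySem.List.pyRange 0 n 1).foldl (fun m i =>
    m ++ [(PySem.List.pyRange 0 n 1).foldl (fun row _ =>
            (PySem.List.pyRange 0 n 1).foldl (pvNodeB list_qubit_neighbors) row)
          (PySem.List.pySetD (List.replicate n.toNat n) i 0)]) []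

-- ===== PRECONDITION & SPEC =====
-- Pre_ excludes the inputs on which A raises IndexError (n > len(list_qubit_neighbors), or an
-- adjacency entry ≥ n or < -n) and also adjacency entries in [-n,0): node ids must lie in
-- [0,n), and Python's negative-index wraparound on such malformed ids is an accident of the
-- programs' list indexing (see claim.json cites for one excluded input on which A still returns).
def Pre_construct_device_distance_matrix (list_qubit_neighbors : List (List Int)) (n : Int) : Prop :=
  n ≤ (list_qubit_neighbors.length : Int) ∧
  ∀ l ∈ list_qubit_neighbors.take n.toNat, ∀ j ∈ l, 0 ≤ j ∧ j < n

instance (list_qubit_neighbors : List (List Int)) (n : Int) :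
    Decidable (Pre_construct_device_distance_matrix list_qubit_neighbors n) := by
  unfold Pre_construct_device_distance_matrix; infer_instance

def pvWitness_construct_device_distance_matrix : List (List Int) × Int := ([[1], [0, 2], [1]], 3)

def Spec_construct_device_distance_matrix (list_qubit_neighbors : List (List Int)) (n : Int) (out : List (List Int)) : Prop := out = construct_device_distance_matrix_alt list_qubit_neighbors n
instance (list_qubit_neighbors : List (List Int)) (n : Int) (out : List (List Int)) : Decidable (Spec_construct_device_distance_matrix list_qubit_neighbors n out) := by unfold Spec_construct_device_distance_matrix; infer_instance

-- ===== CLAIM (what is proved, stated in full; the proofs are below) =====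
def Claim_equal_construct_device_distance_matrix : Prop := ∀ (list_qubit_neighbors : List (List Int)) (n : Int), Dom_construct_device_distance_matrix list_qubit_neighbors n → Pre_construct_device_distance_matrix list_qubit_neighbors n → Spec_construct_device_distance_matrix list_qubit_neighbors n (construct_device_distance_matrix list_qubit_neighbors n)

-- ===== LEMMAS AND PROOFS =====

-- every node id in [0,n) has a neighbor list, itself listing only ids in [0,n)
def pvNB (nbrs : List (List Int)) (n : Int) : Prop :=
  ∀ q : Int, 0 ≤ q → q < n → ∃ l, PySem.List.pyGet? nbrs q = some l ∧ ∀ j ∈ l, 0 ≤ j ∧ j < n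

lemma pvNB_of_pre {nbrs : List (List Int)} {n : Int}
    (h : Pre_construct_device_distance_matrix nbrs n) : pvNB nbrs n := by
  obtain ⟨hlen, hall⟩ := h
  intro q hq0 hqn
  have hqlen : q < (nbrs.length : Int) := lt_of_lt_of_le hqn hlen
  have hq : q.toNat < nbrs.length := by omega
  refine ⟨nbrs[q.toNat], PySem.List.pyGet?_eq_some_getElem nbrs hq0 hqlen, ?_⟩
  have hqn' : q.toNat < n.toNat := by omega
  have hmem : nbrs[q.toNat] ∈ nbrs.take n.toNat := by
    have : (nbrs.take n.toNat)[q.toNat]'(by simp; omega) = nbrs[q.toNat] := List.getElem_take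
    exact this ▸ List.getElem_mem _
  exact hall _ hmem

lemma pvGetD_nonneg {α : Type} (xs : List α) (i : Int) (d : α) (h : 0 ≤ i) :
    PySem.List.pyGetD xs i d = xs.getD i.toNat d := by
  have : i = ((i.toNat : Nat) : Int) := by omega
  rw [this, PySem.List.pyGetD_natCast, Int.toNat_natCast]

lemma pvGetSet (row : List Int) (j p v : Int) (hj0 : 0 ≤ j) (hj : j < (row.length : Int))
    (hp : 0 ≤ p) :
    PySem.List.pyGetD (PySem.List.pySetD row j v) p 0 =
      if p = j then v else PySem.List.pyGetD row p 0 := by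
  rw [PySem.List.pySetD_of_nonneg row v hj0, pvGetD_nonneg _ _ _ hp, pvGetD_nonneg _ _ _ hp,
    List.getD_eq_getElem?_getD, List.getD_eq_getElem?_getD, List.getElem?_set]
  by_cases hpj : p = j
  · subst hpj
    simp only [if_pos (show p.toNat < row.length by omega)]
    simp
  · have : j.toNat ≠ p.toNat := by omega
    simp [this, hpj]

lemma pvLenBound (n : Int) (v : List Int) (hn : v.Nodup) (hb : ∀ x ∈ v, 0 ≤ x ∧ x < n) :
    v.length ≤ n.toNat := by
  have hmap : (v.map Int.toNat).Nodup := by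
    refine hn.map_on ?_
    intro a ha b hbm hab
    have h1 := (hb a ha).1
    have h2 := (hb b hbm).1
    omega
  have hsub : (v.map Int.toNat).toFinset ⊆ Finset.range n.toNat := by
    intro x hx
    simp only [List.mem_toFinset, List.mem_map] at hx
    obtain ⟨y, hy, rfl⟩ := hx
    have := hb y hy
    simp only [Finset.mem_range]
    omega
  have hcard := Finset.card_le_card hsub
  rw [List.toFinset_card_of_nodup hmap, Finset.card_range] at hcard
  simpa using hcard

-- proof-side reference machine: level-synchronous BFS (bridge between A and B)
def pvStepB (d : Int) (st : PySem.Set Int × List Int × List Int) (j : Int) :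
    PySem.Set Int × List Int × List Int :=
  if PySem.Set.contains st.1 j then st
  else (PySem.Set.add st.1 j, st.2.1 ++ [j], PySem.List.pySetD st.2.2 j d)

def pvPopB (nbrs : List (List Int)) (d : Int) (st : PySem.Set Int × List Int × List Int)
    (q : Int) : PySem.Set Int × List Int × List Int :=
  match PySem.List.pyGet? nbrs q with
  | none => st
  | some l => l.foldl (pvStepB d) st

def pvRunB (nbrs : List (List Int)) : Nat → PySem.Set Int → List Int → Int → List Int → List Int
  | 0, _, _, _, row => row
  | _ + 1, _, [], _, row => row
  | f + 1, vis, q :: qs, d, row =>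
    let st := (q :: qs).foldl (pvPopB nbrs (d + 1)) (vis, ([] : List Int), row)
    pvRunB nbrs f st.1 st.2.1 (d + 1) st.2.2

lemma pvInner_bundle (n q d : Int) (hq0 : 0 ≤ q) (hqn : q < n) :
    ∀ (l : List Int) (vis b row : List Int),
      (∀ j ∈ l, 0 ≤ j ∧ j < n) →
      vis.Nodup → (∀ x ∈ vis, 0 ≤ x ∧ x < n) →
      q ∈ vis →
      PySem.List.pyGetD row q 0 = d →
      row.length = n.toNat →
      (∀ pre : List Int,
        l.foldl (pvInnerA q) (vis, pre ++ b, row) =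
          ((l.foldl (pvStepB (d + 1)) (vis, b, row)).1,
           pre ++ (l.foldl (pvStepB (d + 1)) (vis, b, row)).2.1,
           (l.foldl (pvStepB (d + 1)) (vis, b, row)).2.2))
      ∧ (∃ new, (l.foldl (pvStepB (d + 1)) (vis, b, row)).1 = vis ++ new ∧
           (l.foldl (pvStepB (d + 1)) (vis, b, row)).2.1 = b ++ new ∧
           ∀ x ∈ new, 0 ≤ x ∧ x < n)
      ∧ (l.foldl (pvStepB (d + 1)) (vis, b, row)).1.Nodup
      ∧ (l.foldl (pvStepB (d + 1)) (vis, b, row)).2.2.length = n.toNat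
      ∧ (∀ p, p ∈ vis →
          PySem.List.pyGetD (l.foldl (pvStepB (d + 1)) (vis, b, row)).2.2 p 0 =
            PySem.List.pyGetD row p 0)
      ∧ (∀ j, j ∈ (l.foldl (pvStepB (d + 1)) (vis, b, row)).1 → j ∉ vis →
          PySem.List.pyGetD (l.foldl (pvStepB (d + 1)) (vis, b, row)).2.2 j 0 = d + 1) := by
  intro l
  induction l with
  | nil =>
    intro vis b row hl hnd hvb hqv hrq hlen
    exact ⟨fun pre => by simp, ⟨[], by simp, by simp, by simp⟩, hnd, hlen,
      fun p _ => rfl, fun j hj1 hj2 => absurd hj1 hj2⟩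
  | cons j l ih =>
    intro vis b row hl hnd hvb hqv hrq hlen
    have hjb := hl j (List.mem_cons_self ..)
    by_cases hj : j ∈ vis
    · have hc : PySem.Set.contains vis j = true := (PySem.Set.contains_iff _ _).mpr hj
      have hB : pvStepB (d + 1) (vis, b, row) j = (vis, b, row) := by
        simp [pvStepB, hj]
      have hA : ∀ pre : List Int, pvInnerA q (vis, pre ++ b, row) j = (vis, pre ++ b, row) := by
        intro pre; simp [pvInnerA, hj]
      obtain ⟨c1, c2, c3, c4, c5, c6⟩ :=
        ih vis b row (fun x hx => hl x (List.mem_cons_of_mem _ hx)) hnd hvb hqv hrq hlen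
      refine ⟨fun pre => ?_, ?_, ?_, ?_, ?_, ?_⟩ <;>
        simp only [List.foldl_cons, hB, hA] <;>
        first
          | exact c1 pre
          | exact c2
          | exact c3
          | exact c4
          | exact c5
          | exact c6
    · have hc : PySem.Set.contains vis j ≠ true :=
        fun h => hj ((PySem.Set.contains_iff _ _).mp h)
      have hn0 : 0 < n := lt_of_le_of_lt hjb.1 hjb.2
      have hjlen : j < (row.length : Int) := by rw [hlen]; omega
      have hqlen : q < (row.length : Int) := by rw [hlen]; omega
      have hqj : q ≠ j := fun h => hj (h ▸ hqv)
      have hB : pvStepB (d + 1) (vis, b, row) j =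
          (vis ++ [j], b ++ [j], PySem.List.pySetD row j (d + 1)) := by
        simp [pvStepB, hj]
      have hA : ∀ pre : List Int, pvInnerA q (vis, pre ++ b, row) j =
          (vis ++ [j], pre ++ (b ++ [j]), PySem.List.pySetD row j (d + 1)) := by
        intro pre
        simp [pvInnerA, hj, hrq]
      have hrow' : PySem.List.pyGetD (PySem.List.pySetD row j (d + 1)) q 0 = d := by
        rw [pvGetSet row j q (d + 1) hjb.1 hjlen hq0, if_neg hqj, hrq]
      have hlen' : (PySem.List.pySetD row j (d + 1)).length = n.toNat := by
        rw [PySem.List.pySetD_of_nonneg row (d + 1) hjb.1, List.length_set, hlen]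
      have hnd' : (vis ++ [j]).Nodup := by
        simp only [List.nodup_append, List.nodup_singleton, true_and]
        refine ⟨hnd, ?_⟩
        intro a ha b hbm
        simp only [List.mem_singleton] at hbm
        subst hbm
        exact fun h => hj (h ▸ ha)
      have hvb' : ∀ x ∈ vis ++ [j], 0 ≤ x ∧ x < n := by
        intro x hx
        rcases List.mem_append.mp hx with hx | hx
        · exact hvb x hx
        · simp at hx; subst hx; exact hjb
      obtain ⟨c1, c2, c3, c4, c5, c6⟩ :=
        ih (vis ++ [j]) (b ++ [j]) (PySem.List.pySetD row j (d + 1))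
          (fun x hx => hl x (List.mem_cons_of_mem _ hx)) hnd' hvb'
          (List.mem_append_left _ hqv) hrow' hlen'
      refine ⟨fun pre => ?_, ?_, ?_, ?_, ?_, ?_⟩ <;>
        simp only [List.foldl_cons, hB, hA]
      · exact c1 pre
      · obtain ⟨new, e1, e2, e3⟩ := c2
        refine ⟨j :: new, ?_, ?_, ?_⟩
        · rw [e1]; simp
        · rw [e2]; simp
        · intro x hx
          rcases List.mem_cons.mp hx with hx | hx
          · subst hx; exact hjb
          · exact e3 x hx
      · exact c3
      · exact c4
      · intro p hp
        have hp0 := (hvb p hp).1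
        have hpj : p ≠ j := fun h => hj (h ▸ hp)
        rw [c5 p (List.mem_append_left _ hp),
          pvGetSet row j p (d + 1) hjb.1 hjlen hp0, if_neg hpj]
      · intro x hx1 hx2
        by_cases hxj : x = j
        · rw [hxj, c5 j (List.mem_append_right _ (by simp)),
            pvGetSet row j j (d + 1) hjb.1 hjlen hjb.1, if_pos rfl]
        · have hxv : x ∉ vis ++ [j] := by
            intro hmem
            rcases List.mem_append.mp hmem with h | h
            · exact hx2 h
            · simp at h; exact hxj h
          exact c6 x hx1 hxv

lemma pvRound_bundle (nbrs : List (List Int)) (n : Int) (hNB : pvNB nbrs n) (d : Int) :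
    ∀ (front : List Int) (vis b row : List Int),
      vis.Nodup → (∀ x ∈ vis, 0 ≤ x ∧ x < n) →
      (∀ q ∈ front, q ∈ vis ∧ PySem.List.pyGetD row q 0 = d ∧ 0 ≤ q ∧ q < n) →
      row.length = n.toNat →
      (∀ f, pvRunA nbrs (front.length + f) vis (front ++ b) row =
        pvRunA nbrs f (front.foldl (pvPopB nbrs (d + 1)) (vis, b, row)).1
          (front.foldl (pvPopB nbrs (d + 1)) (vis, b, row)).2.1
          (front.foldl (pvPopB nbrs (d + 1)) (vis, b, row)).2.2)
      ∧ (∃ new, (front.foldl (pvPopB nbrs (d + 1)) (vis, b, row)).1 = vis ++ new ∧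
           (front.foldl (pvPopB nbrs (d + 1)) (vis, b, row)).2.1 = b ++ new ∧
           ∀ x ∈ new, 0 ≤ x ∧ x < n)
      ∧ (front.foldl (pvPopB nbrs (d + 1)) (vis, b, row)).1.Nodup
      ∧ (front.foldl (pvPopB nbrs (d + 1)) (vis, b, row)).2.2.length = n.toNat
      ∧ (∀ p, p ∈ vis →
          PySem.List.pyGetD (front.foldl (pvPopB nbrs (d + 1)) (vis, b, row)).2.2 p 0 =
            PySem.List.pyGetD row p 0)
      ∧ (∀ j, j ∈ (front.foldl (pvPopB nbrs (d + 1)) (vis, b, row)).1 → j ∉ vis →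
          PySem.List.pyGetD (front.foldl (pvPopB nbrs (d + 1)) (vis, b, row)).2.2 j 0 = d + 1) := by
  intro front
  induction front with
  | nil =>
    intro vis b row hnd hvb hfr hlen
    exact ⟨fun f => by simp, ⟨[], by simp, by simp, by simp⟩, hnd, hlen,
      fun p _ => rfl, fun j h1 h2 => absurd h1 h2⟩
  | cons q rest ih =>
    intro vis b row hnd hvb hfr hlen
    obtain ⟨hqv, hrq, hq0, hqn⟩ := hfr q (List.mem_cons_self ..)
    obtain ⟨l, hget, hlb⟩ := hNB q hq0 hqn
    obtain ⟨i1, i2, i3, i4, i5, i6⟩ :=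
      pvInner_bundle n q d hq0 hqn l vis b row hlb hnd hvb hqv hrq hlen
    have hpop : pvPopB nbrs (d + 1) (vis, b, row) q =
        l.foldl (pvStepB (d + 1)) (vis, b, row) := by
      simp [pvPopB, hget]
    obtain ⟨new1, e1, e2, e3⟩ := i2
    have hvb' : ∀ x ∈ (l.foldl (pvStepB (d + 1)) (vis, b, row)).1, 0 ≤ x ∧ x < n := by
      rw [e1]; intro x hx
      rcases List.mem_append.mp hx with hx | hx
      · exact hvb x hx
      · exact e3 x hx
    have hfr' : ∀ q' ∈ rest, q' ∈ (l.foldl (pvStepB (d + 1)) (vis, b, row)).1 ∧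
        PySem.List.pyGetD (l.foldl (pvStepB (d + 1)) (vis, b, row)).2.2 q' 0 = d ∧
        0 ≤ q' ∧ q' < n := by
      intro q' hq'
      obtain ⟨hv', hr', h0', hn'⟩ := hfr q' (List.mem_cons_of_mem _ hq')
      exact ⟨by rw [e1]; exact List.mem_append_left _ hv', by rw [i5 q' hv']; exact hr',
        h0', hn'⟩
    obtain ⟨r1, r2, r3, r4, r5, r6⟩ :=
      ih (l.foldl (pvStepB (d + 1)) (vis, b, row)).1
        (l.foldl (pvStepB (d + 1)) (vis, b, row)).2.1
        (l.foldl (pvStepB (d + 1)) (vis, b, row)).2.2 i3 hvb' hfr' i4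
    have hstepA : ∀ f : Nat, pvRunA nbrs (rest.length + f + 1) vis ((q :: rest) ++ b) row =
        pvRunA nbrs (rest.length + f) (l.foldl (pvStepB (d + 1)) (vis, b, row)).1
          (rest ++ (l.foldl (pvStepB (d + 1)) (vis, b, row)).2.1)
          (l.foldl (pvStepB (d + 1)) (vis, b, row)).2.2 := by
      intro f
      show pvRunA nbrs ((rest.length + f) + 1) vis (q :: (rest ++ b)) row = _
      simp only [pvRunA, PySem.Set.add_of_mem hqv, hget]
      rw [i1 rest]
    have hTfold : (q :: rest).foldl (pvPopB nbrs (d + 1)) (vis, b, row) =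
        rest.foldl (pvPopB nbrs (d + 1)) (l.foldl (pvStepB (d + 1)) (vis, b, row)) := by
      rw [List.foldl_cons, hpop]
    rw [hTfold]
    refine ⟨fun f => ?_, ?_, r3, r4, ?_, ?_⟩
    · have hfl : (q :: rest).length + f = rest.length + f + 1 := by simp; omega
      rw [hfl, hstepA f]
      have := r1 f
      simpa using this
    · obtain ⟨new2, f1, f2, f3⟩ := r2
      refine ⟨new1 ++ new2, ?_, ?_, ?_⟩
      · rw [f1, e1, List.append_assoc]
      · rw [f2, e2, List.append_assoc]
      · intro x hx
        rcases List.mem_append.mp hx with hx | hx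
        · exact e3 x hx
        · exact f3 x hx
    · intro p hp
      rw [r5 p (by rw [e1]; exact List.mem_append_left _ hp), i5 p hp]
    · intro x hx1 hx2
      by_cases hxS : x ∈ (l.foldl (pvStepB (d + 1)) (vis, b, row)).1
      · rw [r5 x hxS, i6 x hxS hx2]
      · obtain ⟨new2, f1, f2, f3⟩ := r2
        exact r6 x hx1 hxS

lemma pvSim (nbrs : List (List Int)) (n : Int) (hNB : pvNB nbrs n) :
    ∀ (fB fA : Nat) (vis front row : List Int) (d : Int),
      vis.Nodup → (∀ x ∈ vis, 0 ≤ x ∧ x < n) →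
      (∀ q ∈ front, q ∈ vis ∧ PySem.List.pyGetD row q 0 = d ∧ 0 ≤ q ∧ q < n) →
      row.length = n.toNat →
      front.length + (n.toNat - vis.length) ≤ fA →
      n.toNat - vis.length < fB →
      pvRunA nbrs fA vis front row = pvRunB nbrs fB vis front d row := by
  intro fB
  induction fB with
  | zero =>
    intro fA vis front row d _ _ _ _ _ hfB
    omega
  | succ fB ih =>
    intro fA vis front row d hnd hvb hfr hlen hfA hfB
    cases front with
    | nil => cases fA <;> simp [pvRunA, pvRunB]
    | cons q qs =>
      obtain ⟨r1, r2, r3, r4, r5, r6⟩ :=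
        pvRound_bundle nbrs n hNB d (q :: qs) vis [] row hnd hvb hfr hlen
      obtain ⟨new, e1, e2, e3⟩ := r2
      have hT21 : ((q :: qs).foldl (pvPopB nbrs (d + 1)) (vis, [], row)).2.1 = new := by
        simpa using e2
      have hA : pvRunA nbrs fA vis (q :: qs) row =
          pvRunA nbrs (fA - (q :: qs).length)
            ((q :: qs).foldl (pvPopB nbrs (d + 1)) (vis, [], row)).1
            ((q :: qs).foldl (pvPopB nbrs (d + 1)) (vis, [], row)).2.1
            ((q :: qs).foldl (pvPopB nbrs (d + 1)) (vis, [], row)).2.2 := by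
        have hfA' : fA = (q :: qs).length + (fA - (q :: qs).length) := by
          simp at hfA ⊢; omega
        conv_lhs => rw [hfA']
        have := r1 (fA - (q :: qs).length)
        simpa using this
      have hB : pvRunB nbrs (fB + 1) vis (q :: qs) d row =
          pvRunB nbrs fB ((q :: qs).foldl (pvPopB nbrs (d + 1)) (vis, [], row)).1
            ((q :: qs).foldl (pvPopB nbrs (d + 1)) (vis, [], row)).2.1 (d + 1)
            ((q :: qs).foldl (pvPopB nbrs (d + 1)) (vis, [], row)).2.2 := by
        simp only [pvRunB]
      rw [hA, hB]
      have hdis : ∀ a ∈ vis, ∀ b ∈ new, a ≠ b :=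
        (List.nodup_append.mp (by rw [← e1]; exact r3)).2.2
      have hvbT : ∀ x ∈ ((q :: qs).foldl (pvPopB nbrs (d + 1)) (vis, [], row)).1,
          0 ≤ x ∧ x < n := by
        rw [e1]; intro x hx
        rcases List.mem_append.mp hx with hx | hx
        · exact hvb x hx
        · exact e3 x hx
      have hfr' : ∀ q' ∈ ((q :: qs).foldl (pvPopB nbrs (d + 1)) (vis, [], row)).2.1,
          q' ∈ ((q :: qs).foldl (pvPopB nbrs (d + 1)) (vis, [], row)).1 ∧
          PySem.List.pyGetD ((q :: qs).foldl (pvPopB nbrs (d + 1)) (vis, [], row)).2.2 q' 0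
            = d + 1 ∧ 0 ≤ q' ∧ q' < n := by
        rw [hT21]
        intro q' hq'
        have hmem : q' ∈ ((q :: qs).foldl (pvPopB nbrs (d + 1)) (vis, [], row)).1 := by
          rw [e1]; exact List.mem_append_right _ hq'
        have hnv : q' ∉ vis := fun hv => hdis q' hv q' hq' rfl
        exact ⟨hmem, r6 q' hmem hnv, e3 q' hq'⟩
      by_cases hnil : new = []
      · rw [hT21, hnil]
        cases (fA - (q :: qs).length) <;> cases fB <;> simp [pvRunA, pvRunB]
      · have hTlen : ((q :: qs).foldl (pvPopB nbrs (d + 1)) (vis, [], row)).1.length =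
            vis.length + new.length := by rw [e1]; simp
        have hbound := pvLenBound n _ r3 hvbT
        rw [hTlen] at hbound
        have hnew1 : 1 ≤ new.length := by
          cases new with
          | nil => exact absurd rfl hnil
          | cons _ _ => simp
        refine ih (fA - (q :: qs).length) _ _ _ (d + 1) r3 hvbT hfr' r4 ?_ ?_
        · rw [hT21, hTlen]
          omega
        · rw [hTlen]
          omega

lemma pvRow_eq (nbrs : List (List Int)) (n : Int) (hNB : pvNB nbrs n) (i : Int)
    (h0 : 0 ≤ i) (hin : i < n) :
    pvRunA nbrs (n.toNat + 1) PySem.Set.empty [i]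
        (PySem.List.pySetD (List.replicate n.toNat n) i 0) =
      pvRunB nbrs (n.toNat + 1) (PySem.Set.ofList [i]) [i] 0
        (PySem.List.pySetD (List.replicate n.toNat n) i 0) := by
  have hn1 : 1 ≤ n.toNat := by omega
  have hofl : PySem.Set.ofList [i] = [i] := rfl
  have hstart : PySem.Set.add PySem.Set.empty i = [i] := rfl
  have hstart2 : PySem.Set.add [i] i = [i] := PySem.Set.add_of_mem (by simp)
  have hfirst : pvRunA nbrs (n.toNat + 1) PySem.Set.empty [i]
      (PySem.List.pySetD (List.replicate n.toNat n) i 0) =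
      pvRunA nbrs (n.toNat + 1) [i] [i]
      (PySem.List.pySetD (List.replicate n.toNat n) i 0) := by
    simp only [pvRunA, hstart, hstart2]
  rw [hfirst, hofl]
  have hlenrep : ((List.replicate n.toNat n).length : Int) = (n.toNat : Int) := by simp
  have hilt : i < ((List.replicate n.toNat n).length : Int) := by rw [hlenrep]; omega
  refine pvSim nbrs n hNB (n.toNat + 1) (n.toNat + 1) [i] [i] _ 0
    (List.nodup_singleton i) ?_ ?_ ?_ ?_ ?_
  · intro x hx
    simp only [List.mem_singleton] at hx
    subst hx
    exact ⟨h0, hin⟩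
  · intro x hx
    simp only [List.mem_singleton] at hx
    rw [hx]
    refine ⟨by simp, ?_, h0, hin⟩
    rw [pvGetSet (List.replicate n.toNat n) i i 0 h0 hilt h0, if_pos rfl]
  · rw [PySem.List.pySetD_of_nonneg _ _ h0, List.length_set, List.length_replicate]
  · simp only [List.length_singleton]
    omega
  · simp only [List.length_singleton]
    omega

lemma pvFoldSet (n : Int) (g : Int → List Int → List Int) (c : List Int) :
    ∀ (k : Nat) (a : Int) (m : List (List Int)), 0 ≤ a → (n - a).toNat = k →
      m.length = n.toNat →
      (∀ j : Nat, a ≤ (j : Int) → j < n.toNat → m[j]? = some c) →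
      (PySem.List.pyRange a n 1).foldl
          (fun m i => PySem.List.pySetD m i (g i (PySem.List.pyGetD m i []))) m =
        m.take a.toNat ++ (PySem.List.pyRange a n 1).map (fun i => g i c) := by
  intro k
  induction k with
  | zero =>
    intro a m ha hk hm _
    have hna : n ≤ a := by omega
    rw [PySem.List.pyRange_one_eq_nil hna]
    simp only [List.foldl_nil, List.map_nil, List.append_nil]
    rw [List.take_of_length_le (by omega)]
  | succ k ih =>
    intro a m ha hk hm hc
    have han : a < n := by omega
    have hat : a.toNat < m.length := by omega
    rw [PySem.List.pyRange_one_cons han, List.foldl_cons, List.map_cons]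
    have hget : PySem.List.pyGetD m a [] = c := by
      rw [pvGetD_nonneg _ _ _ ha, List.getD_eq_getElem?_getD,
        hc a.toNat (by omega) (by omega)]
      rfl
    rw [hget]
    have hset : PySem.List.pySetD m a (g a c) = m.set a.toNat (g a c) :=
      PySem.List.pySetD_of_nonneg m (g a c) ha
    rw [hset]
    rw [ih (a + 1) (m.set a.toNat (g a c)) (by omega) (by omega) (by simp [hm]) ?hcc]
    case hcc =>
      intro j hj1 hj2
      rw [List.getElem?_set]
      have : a.toNat ≠ j := by omega
      simp only [if_neg this]
      exact hc j (by omega) hj2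
    have htake : (m.set a.toNat (g a c)).take (a + 1).toNat =
        m.take a.toNat ++ [g a c] := by
      rw [List.set_eq_take_append_cons_drop, if_pos hat]
      have h1 : (a + 1).toNat = (m.take a.toNat).length + 1 := by
        simp [List.length_take]
        omega
      rw [h1, List.take_append]
      simp
    rw [htake, List.append_assoc]
    rfl

-- ===== reachability levels: pvR nbrs n i d j = 'j is reachable from i in ≤ d steps' =====

def pvR (nbrs : List (List Int)) (n i : Int) : Nat → Int → Bool
  | 0, j => j == i
  | d + 1, j => pvR nbrs n i d j ||
      (PySem.List.pyRange 0 n 1).any (fun q =>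
        pvR nbrs n i d q && ((PySem.List.pyGet? nbrs q).getD []).contains j)

lemma pvR_le (nbrs : List (List Int)) (n i : Int) {d e : Nat} (h : d ≤ e) {j : Int}
    (hd : pvR nbrs n i d j = true) : pvR nbrs n i e j = true := by
  obtain ⟨m, rfl⟩ : ∃ m, e = d + m := ⟨e - d, by omega⟩
  clear h
  induction m with
  | zero => exact hd
  | succ m ih =>
    show pvR nbrs n i (d + m + 1) j = true
    simp only [pvR, Bool.or_eq_true]
    exact Or.inl ih

lemma pvR_bound (nbrs : List (List Int)) (n i : Int) (hNB : pvNB nbrs n)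
    (h0 : 0 ≤ i) (hin : i < n) :
    ∀ (d : Nat) (j : Int), pvR nbrs n i d j = true → 0 ≤ j ∧ j < n := by
  intro d
  induction d with
  | zero =>
    intro j hj
    simp only [pvR, beq_iff_eq] at hj
    subst hj
    exact ⟨h0, hin⟩
  | succ d ih =>
    intro j hj
    simp only [pvR, Bool.or_eq_true, List.any_eq_true, Bool.and_eq_true] at hj
    rcases hj with hj | ⟨q, hq, hRq, hc⟩
    · exact ih j hj
    · obtain ⟨hq0, hqn⟩ := PySem.List.mem_pyRange_one.mp hq
      obtain ⟨l, hget, hlb⟩ := hNB q hq0 hqn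
      rw [hget] at hc
      exact hlb j (by simpa using hc)

-- the common output characterization: row[j] is the least reachability level, or n
def pvOut (nbrs : List (List Int)) (n i : Int) (row : List Int) (j : Int) : Prop :=
  ((∀ e : Nat, ¬ pvR nbrs n i e j = true) ∧ PySem.List.pyGetD row j 0 = n) ∨
  (∃ e : Nat, (∀ e' < e, ¬ pvR nbrs n i e' j = true) ∧ pvR nbrs n i e j = true ∧
    PySem.List.pyGetD row j 0 = (e : Int))

lemma pvOut_unique {nbrs : List (List Int)} {n i : Int} {row row' : List Int} {j : Int}
    (h1 : pvOut nbrs n i row j) (h2 : pvOut nbrs n i row' j) :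
    PySem.List.pyGetD row j 0 = PySem.List.pyGetD row' j 0 := by
  rcases h1 with ⟨hn1, hv1⟩ | ⟨e1, hl1, hr1, hv1⟩ <;>
    rcases h2 with ⟨hn2, hv2⟩ | ⟨e2, hl2, hr2, hv2⟩
  · rw [hv1, hv2]
  · exact absurd hr2 (hn1 e2)
  · exact absurd hr1 (hn2 e1)
  · have he : e1 = e2 := by
      rcases Nat.lt_trichotomy e1 e2 with h | h | h
      · exact absurd hr1 (hl2 e1 h)
      · exact h
      · exact absurd hr2 (hl1 e2 h)
    rw [hv1, hv2, he]

lemma pvStepFold_len (d : Int) :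
    ∀ (l : List Int) (st : PySem.Set Int × List Int × List Int),
      (l.foldl (pvStepB d) st).2.2.length = st.2.2.length := by
  intro l
  induction l with
  | nil => intro st; rfl
  | cons j l ih =>
    intro st
    rw [List.foldl_cons, ih]
    unfold pvStepB
    split
    · rfl
    · simp [PySem.List.length_pySetD]

-- structural facts about one level-BFS inner fold that the bundles do not state
lemma pvStepB_facts (d : Int) :
    ∀ (l vis b row : List Int),
      (∀ j ∈ l, 0 ≤ j ∧ j < (row.length : Int)) →
      ∃ new,
        (l.foldl (pvStepB d) (vis, b, row)).1 = vis ++ new ∧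
        (l.foldl (pvStepB d) (vis, b, row)).2.1 = b ++ new ∧
        (∀ x ∈ new, x ∈ l) ∧
        (∀ j ∈ l, j ∈ (l.foldl (pvStepB d) (vis, b, row)).1) ∧
        (∀ p : Int, 0 ≤ p → p ∉ new →
          PySem.List.pyGetD (l.foldl (pvStepB d) (vis, b, row)).2.2 p 0 =
            PySem.List.pyGetD row p 0) := by
  intro l
  induction l with
  | nil =>
    intro vis b row _
    exact ⟨[], by simp, by simp, by simp, by simp, fun p _ _ => rfl⟩
  | cons j l ih =>
    intro vis b row hl
    have hjb := hl j (List.mem_cons_self ..)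
    by_cases hj : j ∈ vis
    · have hB : pvStepB d (vis, b, row) j = (vis, b, row) := by
        simp [pvStepB, hj]
      obtain ⟨new, c1, c2, c3, c4, c5⟩ :=
        ih vis b row (fun x hx => hl x (List.mem_cons_of_mem _ hx))
      refine ⟨new, ?_, ?_, ?_, ?_, ?_⟩ <;> try simp only [List.foldl_cons, hB]
      · exact c1
      · exact c2
      · exact fun x hx => List.mem_cons_of_mem _ (c3 x hx)
      · intro x hx
        rcases List.mem_cons.mp hx with hx | hx
        · subst hx; rw [c1]; exact List.mem_append_left _ hj
        · exact c4 x hx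
      · exact c5
    · have hB : pvStepB d (vis, b, row) j =
          (vis ++ [j], b ++ [j], PySem.List.pySetD row j d) := by
        simp [pvStepB, hj]
      have hlen' : (PySem.List.pySetD row j d).length = row.length := by
        simp [PySem.List.length_pySetD]
      obtain ⟨new, c1, c2, c3, c4, c5⟩ :=
        ih (vis ++ [j]) (b ++ [j]) (PySem.List.pySetD row j d)
          (fun x hx => by rw [hlen']; exact hl x (List.mem_cons_of_mem _ hx))
      refine ⟨j :: new, ?_, ?_, ?_, ?_, ?_⟩ <;> try simp only [List.foldl_cons, hB]
      · rw [c1, List.append_assoc]; rfl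
      · rw [c2, List.append_assoc]; rfl
      · intro x hx
        rcases List.mem_cons.mp hx with hx | hx
        · subst hx; exact List.mem_cons_self ..
        · exact List.mem_cons_of_mem _ (c3 x hx)
      · intro x hx
        rcases List.mem_cons.mp hx with hx | hx
        · subst hx
          rw [c1]
          exact List.mem_append_left _ (List.mem_append_right _ (by simp))
        · exact c4 x hx
      · intro p hp0 hp
        have hpj : p ≠ j := fun h => hp (h ▸ List.mem_cons_self ..)
        have hpnew : p ∉ new := fun h => hp (List.mem_cons_of_mem _ h)
        rw [c5 p hp0 hpnew, pvGetSet row j p d hjb.1 hjb.2 hp0, if_neg hpj]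

lemma pvPopB_facts (nbrs : List (List Int)) (n : Int) (hNB : pvNB nbrs n) (d : Int) :
    ∀ (front vis b row : List Int),
      (∀ q ∈ front, 0 ≤ q ∧ q < n) →
      row.length = n.toNat →
      ∃ new,
        (front.foldl (pvPopB nbrs d) (vis, b, row)).1 = vis ++ new ∧
        (∀ x ∈ new, ∃ q ∈ front, ∃ l, PySem.List.pyGet? nbrs q = some l ∧ x ∈ l) ∧
        (∀ q ∈ front, ∀ l, PySem.List.pyGet? nbrs q = some l →
          ∀ j ∈ l, j ∈ (front.foldl (pvPopB nbrs d) (vis, b, row)).1) ∧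
        (∀ p : Int, 0 ≤ p → p ∉ new →
          PySem.List.pyGetD (front.foldl (pvPopB nbrs d) (vis, b, row)).2.2 p 0 =
            PySem.List.pyGetD row p 0) := by
  intro front
  induction front with
  | nil =>
    intro vis b row _ _
    exact ⟨[], by simp, by simp, by simp, fun p _ _ => rfl⟩
  | cons q rest ih =>
    intro vis b row hfb hlen
    obtain ⟨hq0, hqn⟩ := hfb q (List.mem_cons_self ..)
    have hn0 : 0 < n := lt_of_le_of_lt hq0 hqn
    obtain ⟨l, hget, hlb⟩ := hNB q hq0 hqn
    have hlb' : ∀ j ∈ l, 0 ≤ j ∧ j < (row.length : Int) := by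
      intro j hj
      obtain ⟨h1, h2⟩ := hlb j hj
      refine ⟨h1, ?_⟩
      rw [hlen]
      omega
    obtain ⟨new1, c1, c2, c3, c4, c5⟩ := pvStepB_facts d l vis b row hlb'
    have hpop : pvPopB nbrs d (vis, b, row) q = l.foldl (pvStepB d) (vis, b, row) := by
      simp [pvPopB, hget]
    set st1 := l.foldl (pvStepB d) (vis, b, row) with hst1
    have hlen1 : st1.2.2.length = n.toNat := by
      rw [hst1, pvStepFold_len]; exact hlen
    obtain ⟨new2, d1, d2, d3, d4⟩ :=
      ih st1.1 st1.2.1 st1.2.2 (fun x hx => hfb x (List.mem_cons_of_mem _ hx)) hlen1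
    have hres : (q :: rest).foldl (pvPopB nbrs d) (vis, b, row) =
        rest.foldl (pvPopB nbrs d) (st1.1, st1.2.1, st1.2.2) := by
      rw [List.foldl_cons, hpop]
    refine ⟨new1 ++ new2, ?_, ?_, ?_, ?_⟩ <;> try rw [hres]
    · rw [d1, c1, List.append_assoc]
    · intro x hx
      rcases List.mem_append.mp hx with hx | hx
      · exact ⟨q, List.mem_cons_self .., l, hget, c3 x hx⟩
      · obtain ⟨q', hq', l', hget', hx'⟩ := d2 x hx
        exact ⟨q', List.mem_cons_of_mem _ hq', l', hget', hx'⟩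
    · intro q' hq' l' hget' j hj
      rcases List.mem_cons.mp hq' with hq' | hq'
      · subst hq'
        have : l' = l := by rw [hget] at hget'; exact (Option.some.inj hget').symm
        subst this
        have hjst : j ∈ st1.1 := c4 j hj
        rw [d1]
        exact List.mem_append_left _ hjst
      · exact d3 q' hq' l' hget' j hj
    · intro p hp0 hp
      have hp1 : p ∉ new1 := fun h => hp (List.mem_append_left _ h)
      have hp2 : p ∉ new2 := fun h => hp (List.mem_append_right _ h)
      rw [d4 p hp0 hp2, c5 p hp0 hp1]

-- final state of a closed visited set characterizes the row
lemma pvClosed_out (nbrs : List (List Int)) (n i : Int) (hNB : pvNB nbrs n)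
    (h0i : 0 ≤ i) (hin : i < n) (dN : Nat) (vis row : List Int)
    (hvis : ∀ x, x ∈ vis ↔ pvR nbrs n i dN x = true)
    (hclosed : ∀ q ∈ vis, ∀ l, PySem.List.pyGet? nbrs q = some l → ∀ j ∈ l, j ∈ vis)
    (hrow : ∀ j : Int, 0 ≤ j → j < n →
      (pvR nbrs n i dN j = true → ∃ e : Nat, (∀ e' < e, ¬ pvR nbrs n i e' j = true) ∧
        pvR nbrs n i e j = true ∧ PySem.List.pyGetD row j 0 = (e : Int)) ∧
      (¬ pvR nbrs n i dN j = true → PySem.List.pyGetD row j 0 = n)) :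
    ∀ j : Int, 0 ≤ j → j < n → pvOut nbrs n i row j := by
  have hiv : i ∈ vis := by
    rw [hvis]
    exact pvR_le nbrs n i (Nat.zero_le dN) (by simp [pvR])
  have hcl : ∀ (e : Nat) (x : Int), pvR nbrs n i e x = true → x ∈ vis := by
    intro e
    induction e with
    | zero =>
      intro x hx
      simp only [pvR, beq_iff_eq] at hx
      subst hx
      exact hiv
    | succ e ih =>
      intro x hx
      simp only [pvR, Bool.or_eq_true, List.any_eq_true, Bool.and_eq_true] at hx
      rcases hx with hx | ⟨q, hq, hRq, hc⟩
      · exact ih x hx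
      · obtain ⟨hq0, hqn⟩ := PySem.List.mem_pyRange_one.mp hq
        obtain ⟨l, hget, _⟩ := hNB q hq0 hqn
        rw [hget] at hc
        exact hclosed q (ih q hRq) l hget x (by simpa using hc)
  intro j hj0 hjn
  by_cases hex : ∃ e : Nat, pvR nbrs n i e j = true
  · obtain ⟨e, he⟩ := hex
    have hjv : j ∈ vis := hcl e j he
    have hRd : pvR nbrs n i dN j = true := (hvis j).mp hjv
    obtain ⟨e0, hl0, hr0, hv0⟩ := (hrow j hj0 hjn).1 hRd
    exact Or.inr ⟨e0, hl0, hr0, hv0⟩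
  · push Not at hex
    refine Or.inl ⟨fun e => hex e, ?_⟩
    exact (hrow j hj0 hjn).2 (hex dN)

lemma pvLvl_correct (nbrs : List (List Int)) (n i : Int) (hNB : pvNB nbrs n)
    (h0i : 0 ≤ i) (hin : i < n) :
    ∀ (fB : Nat) (dN : Nat) (vis front row : List Int),
      vis.Nodup →
      (∀ x, x ∈ vis ↔ pvR nbrs n i dN x = true) →
      (∀ x, x ∈ front ↔ (pvR nbrs n i dN x = true ∧ ∀ e < dN, ¬ pvR nbrs n i e x = true)) →
      (∀ q ∈ vis, q ∉ front → ∀ l, PySem.List.pyGet? nbrs q = some l → ∀ j ∈ l, j ∈ vis) →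
      (∀ j : Int, 0 ≤ j → j < n →
        (pvR nbrs n i dN j = true → ∃ e : Nat, (∀ e' < e, ¬ pvR nbrs n i e' j = true) ∧
          pvR nbrs n i e j = true ∧ PySem.List.pyGetD row j 0 = (e : Int)) ∧
        (¬ pvR nbrs n i dN j = true → PySem.List.pyGetD row j 0 = n)) →
      row.length = n.toNat →
      n.toNat - vis.length < fB →
      ∀ j : Int, 0 ≤ j → j < n →
        pvOut nbrs n i (pvRunB nbrs fB vis front (dN : Int) row) j := by
  intro fB
  induction fB with
  | zero =>
    intro dN vis front row _ _ _ _ _ _ hfuel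
    omega
  | succ fB ih =>
    intro dN vis front row hnd hvis hfront hclosed hrow hlen hfuel j hj0 hjn
    cases front with
    | nil =>
      have hres : pvRunB nbrs (fB + 1) vis [] (dN : Int) row = row := rfl
      rw [hres]
      exact pvClosed_out nbrs n i hNB h0i hin dN vis row hvis
        (fun q hq l => hclosed q hq (by simp) l) hrow j hj0 hjn
    | cons q qs =>
      have hsub : ∀ x ∈ q :: qs, x ∈ vis := by
        intro x hx
        exact (hvis x).mpr ((hfront x).mp hx).1
      have hvb : ∀ x ∈ vis, 0 ≤ x ∧ x < n := by
        intro x hx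
        exact pvR_bound nbrs n i hNB h0i hin dN x ((hvis x).mp hx)
      have hfr : ∀ q' ∈ q :: qs, q' ∈ vis ∧ PySem.List.pyGetD row q' 0 = (dN : Int) ∧
          0 ≤ q' ∧ q' < n := by
        intro q' hq'
        have hqv := hsub q' hq'
        obtain ⟨hb0, hbn⟩ := hvb q' hqv
        obtain ⟨hRd, hlt⟩ := (hfront q').mp hq'
        obtain ⟨e, hle, hre, hve⟩ := (hrow q' hb0 hbn).1 hRd
        have heq : e = dN := by
          rcases Nat.lt_trichotomy e dN with h | h | h
          · exact absurd hre (hlt e h)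
          · exact h
          · exact absurd hRd (hle dN h)
        exact ⟨hqv, by rw [hve, heq], hb0, hbn⟩
      obtain ⟨r1, r2, r3, r4, r5, r6⟩ :=
        pvRound_bundle nbrs n hNB (dN : Int) (q :: qs) vis [] row hnd hvb hfr hlen
      obtain ⟨new, e1, e2, e3⟩ := r2
      obtain ⟨new2, p1, p2, p3, p4⟩ :=
        pvPopB_facts nbrs n hNB ((dN : Int) + 1) (q :: qs) vis [] row
          (fun x hx => hvb x (hsub x hx)) hlen
      have hnew2 : new2 = new := by
        have := p1.symm.trans e1
        exact List.append_cancel_left this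
      rw [hnew2] at p1 p2 p4
      set st := (q :: qs).foldl (pvPopB nbrs ((dN : Int) + 1)) (vis, [], row) with hst
      have hT21 : st.2.1 = new := by simpa using e2
      have hdis : ∀ x ∈ new, x ∉ vis := by
        have hnd2 := List.nodup_append.mp (e1 ▸ r3)
        intro x hx hxv
        exact hnd2.2.2 x hxv x hx rfl
      have hvis' : ∀ x, x ∈ st.1 ↔ pvR nbrs n i (dN + 1) x = true := by
        intro x
        constructor
        · intro hx
          rw [e1] at hx
          rcases List.mem_append.mp hx with hx | hx
          · exact pvR_le nbrs n i (Nat.le_succ dN) ((hvis x).mp hx)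
          · obtain ⟨q', hq', l, hget, hxl⟩ := p2 x hx
            have hqv := hsub q' hq'
            obtain ⟨hb0, hbn⟩ := hvb q' hqv
            simp only [pvR, Bool.or_eq_true, List.any_eq_true, Bool.and_eq_true]
            refine Or.inr ⟨q', PySem.List.mem_pyRange_one.mpr ⟨hb0, hbn⟩,
              (hvis q').mp hqv, ?_⟩
            rw [hget]
            simpa using hxl
        · intro hx
          simp only [pvR, Bool.or_eq_true, List.any_eq_true, Bool.and_eq_true] at hx
          rcases hx with hx | ⟨q', hq'r, hRq', hc⟩
          · rw [e1]
            exact List.mem_append_left _ ((hvis x).mpr hx)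
          · obtain ⟨hb0, hbn⟩ := PySem.List.mem_pyRange_one.mp hq'r
            obtain ⟨l, hget, _⟩ := hNB q' hb0 hbn
            rw [hget] at hc
            have hxl : x ∈ l := by simpa using hc
            have hq'v : q' ∈ vis := (hvis q').mpr hRq'
            by_cases hq'f : q' ∈ q :: qs
            · exact p3 q' hq'f l hget x hxl
            · rw [e1]
              exact List.mem_append_left _ (hclosed q' hq'v hq'f l hget x hxl)
      have hfront' : ∀ x, x ∈ st.2.1 ↔
          (pvR nbrs n i (dN + 1) x = true ∧ ∀ e < dN + 1, ¬ pvR nbrs n i e x = true) := by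
        intro x
        rw [hT21]
        constructor
        · intro hx
          have hxs : x ∈ st.1 := by rw [e1]; exact List.mem_append_right _ hx
          refine ⟨(hvis' x).mp hxs, ?_⟩
          intro e he hRe
          have : pvR nbrs n i dN x = true := pvR_le nbrs n i (by omega) hRe
          exact hdis x hx ((hvis x).mpr this)
        · rintro ⟨hR, hlt⟩
          have hxs : x ∈ st.1 := (hvis' x).mpr hR
          rw [e1] at hxs
          rcases List.mem_append.mp hxs with hx | hx
          · exact absurd ((hvis x).mp hx) (hlt dN (Nat.lt_succ_self dN))
          · exact hx
      have hclosed' : ∀ q' ∈ st.1, q' ∉ st.2.1 → ∀ l, PySem.List.pyGet? nbrs q' = some l →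
          ∀ j' ∈ l, j' ∈ st.1 := by
        intro q' hq' hq'f l hget j' hj'
        rw [hT21] at hq'f
        have hq'v : q' ∈ vis := by
          rw [e1] at hq'
          rcases List.mem_append.mp hq' with h | h
          · exact h
          · exact absurd h hq'f
        by_cases hq'fr : q' ∈ q :: qs
        · exact p3 q' hq'fr l hget j' hj'
        · rw [e1]
          exact List.mem_append_left _ (hclosed q' hq'v hq'fr l hget j' hj')
      have hrow' : ∀ j' : Int, 0 ≤ j' → j' < n →
          (pvR nbrs n i (dN + 1) j' = true → ∃ e : Nat,
            (∀ e' < e, ¬ pvR nbrs n i e' j' = true) ∧ pvR nbrs n i e j' = true ∧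
            PySem.List.pyGetD st.2.2 j' 0 = (e : Int)) ∧
          (¬ pvR nbrs n i (dN + 1) j' = true → PySem.List.pyGetD st.2.2 j' 0 = n) := by
        intro j' hb0 hbn
        constructor
        · intro hR1
          by_cases hRd : pvR nbrs n i dN j' = true
          · have hjv : j' ∈ vis := (hvis j').mpr hRd
            obtain ⟨e, hle, hre, hve⟩ := (hrow j' hb0 hbn).1 hRd
            exact ⟨e, hle, hre, by rw [r5 j' hjv, hve]⟩
          · have hjs : j' ∈ st.1 := (hvis' j').mpr hR1
            have hjnv : j' ∉ vis := fun h => hRd ((hvis j').mp h)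
            refine ⟨dN + 1, ?_, hR1, ?_⟩
            · intro e' he' hRe'
              exact hRd (pvR_le nbrs n i (by omega) hRe')
            · rw [r6 j' hjs hjnv]
              push_cast
              ring
        · intro hR1
          have hjns : j' ∉ st.1 := fun h => hR1 ((hvis' j').mp h)
          have hjnew : j' ∉ new := fun h => hjns (by rw [e1]; exact List.mem_append_right _ h)
          rw [p4 j' hb0 hjnew]
          refine (hrow j' hb0 hbn).2 ?_
          exact fun h => hR1 (pvR_le nbrs n i (Nat.le_succ dN) h)
      have hstep : pvRunB nbrs (fB + 1) vis (q :: qs) (dN : Int) row =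
          pvRunB nbrs fB st.1 st.2.1 ((dN : Int) + 1) st.2.2 := by
        simp only [pvRunB, hst]
      rw [hstep]
      have hcast : (dN : Int) + 1 = ((dN + 1 : Nat) : Int) := by push_cast; ring
      by_cases hnil : new = []
      · have h21 : st.2.1 = [] := by rw [hT21, hnil]
        have hres : pvRunB nbrs fB st.1 st.2.1 ((dN : Int) + 1) st.2.2 = st.2.2 := by
          rw [h21]
          cases fB <;> rfl
        rw [hres]
        refine pvClosed_out nbrs n i hNB h0i hin (dN + 1) st.1 st.2.2 hvis' ?_ hrow' j hj0 hjn
        intro q' hq' l hget j' hj'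
        exact hclosed' q' hq' (by rw [h21]; simp) l hget j' hj'
      · have hvbT : ∀ x ∈ st.1, 0 ≤ x ∧ x < n := by
          intro x hx
          exact pvR_bound nbrs n i hNB h0i hin (dN + 1) x ((hvis' x).mp hx)
        have hbound := pvLenBound n st.1 r3 hvbT
        have hTlen : st.1.length = vis.length + new.length := by rw [e1]; simp
        have hnew1 : 1 ≤ new.length := by
          cases new with
          | nil => exact absurd rfl hnil
          | cons _ _ => simp
        rw [hcast]
        exact ih (dN + 1) st.1 st.2.1 st.2.2 r3 hvis' hfront' hclosed' hrow' r4
          (by omega) j hj0 hjn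

lemma pvRunB_length (nbrs : List (List Int)) :
    ∀ (f : Nat) (vis front : List Int) (d : Int) (row : List Int),
      (pvRunB nbrs f vis front d row).length = row.length := by
  have hstep : ∀ (l : List Int) (st : PySem.Set Int × List Int × List Int) (d : Int),
      (l.foldl (pvStepB d) st).2.2.length = st.2.2.length := by
    intro l
    induction l with
    | nil => intro st d; rfl
    | cons j l ih =>
      intro st d
      rw [List.foldl_cons, ih]
      unfold pvStepB
      split
      · rfl
      · simp [PySem.List.length_pySetD]
  have hpop : ∀ (front : List Int) (st : PySem.Set Int × List Int × List Int) (d : Int),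
      (front.foldl (pvPopB nbrs d) st).2.2.length = st.2.2.length := by
    intro front
    induction front with
    | nil => intro st d; rfl
    | cons q rest ih =>
      intro st d
      rw [List.foldl_cons, ih]
      unfold pvPopB
      cases PySem.List.pyGet? nbrs q with
      | none => rfl
      | some l => exact hstep l st d
  intro f
  induction f with
  | zero => intro vis front d row; rfl
  | succ f ih =>
    intro vis front d row
    cases front with
    | nil => rfl
    | cons q qs =>
      show (pvRunB nbrs f _ _ _ _).length = _
      rw [ih]
      exact hpop (q :: qs) (vis, [], row) (d + 1)

-- ===== Bellman-Ford side =====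

def pvBInv (nbrs : List (List Int)) (n i : Int) (row : List Int) : Prop :=
  row.length = n.toNat ∧
  ∀ j : Int, 0 ≤ j → j < n →
    PySem.List.pyGetD row j 0 ≤ n ∧
    (PySem.List.pyGetD row j 0 = n ∨
      ∃ e : Nat, pvR nbrs n i e j = true ∧ PySem.List.pyGetD row j 0 = (e : Int))

def pvComp (nbrs : List (List Int)) (n i : Int) (t : Nat) (row : List Int) : Prop :=
  ∀ j : Int, 0 ≤ j → j < n → ∀ e : Nat, e ≤ t → pvR nbrs n i e j = true →
    PySem.List.pyGetD row j 0 ≤ (e : Int)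

lemma pvEdgeFold_facts (nbrs : List (List Int)) (n i q : Int) (h0q : 0 ≤ q) (hqn : q < n) :
    ∀ (l row : List Int),
      (∀ j ∈ l, 0 ≤ j ∧ j < n) →
      (∀ j ∈ l, ((PySem.List.pyGet? nbrs q).getD []).contains j = true) →
      pvBInv nbrs n i row →
      pvBInv nbrs n i (l.foldl (pvEdgeB q) row) ∧
      (∀ p : Int, 0 ≤ p → p < n →
        PySem.List.pyGetD (l.foldl (pvEdgeB q) row) p 0 ≤ PySem.List.pyGetD row p 0) ∧
      PySem.List.pyGetD (l.foldl (pvEdgeB q) row) q 0 = PySem.List.pyGetD row q 0 ∧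
      (∀ j ∈ l, PySem.List.pyGetD (l.foldl (pvEdgeB q) row) j 0 ≤
        PySem.List.pyGetD row q 0 + 1) := by
  intro l
  induction l with
  | nil =>
    intro row _ _ hinv
    exact ⟨hinv, fun p _ _ => le_refl _, rfl, by simp⟩
  | cons j l ih =>
    intro row hlb hmem hinv
    obtain ⟨hlen, hent⟩ := hinv
    have hjb := hlb j (List.mem_cons_self ..)
    have hn0 : 0 < n := lt_of_le_of_lt h0q hqn
    obtain ⟨hqle, hqcase⟩ := hent q h0q hqn
    obtain ⟨hjle, _⟩ := hent j hjb.1 hjb.2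
    by_cases hcond : PySem.List.pyGetD row q 0 + 1 < PySem.List.pyGetD row j 0
    · have hjq : j ≠ q := by
        intro h
        rw [h] at hcond
        omega
      have hjlenI : j < (row.length : Int) := by
        refine lt_of_lt_of_le hjb.2 ?_
        rw [hlen]
        exact Int.self_le_toNat n
      have hstep : pvEdgeB q row j =
          PySem.List.pySetD row j (PySem.List.pyGetD row q 0 + 1) := by
        simp [pvEdgeB, hcond]
      set v := PySem.List.pyGetD row q 0 + 1 with hv
      set row' := PySem.List.pySetD row j v with hrow'
      have hget' : ∀ p : Int, 0 ≤ p → PySem.List.pyGetD row' p 0 =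
          if p = j then v else PySem.List.pyGetD row p 0 := by
        intro p hp
        exact pvGetSet row j p v hjb.1 hjlenI hp
      have hlen' : row'.length = n.toNat := by
        rw [hrow', PySem.List.length_pySetD, hlen]
      have hinv' : pvBInv nbrs n i row' := by
        refine ⟨hlen', ?_⟩
        intro p hp0 hpn
        rw [hget' p hp0]
        by_cases hpj : p = j
        · rw [if_pos hpj, hpj]
          constructor
          · omega
          · rcases hqcase with hq | ⟨e, hre, hqe⟩
            · omega
            · refine Or.inr ⟨e + 1, ?_, ?_⟩
              · simp only [pvR, Bool.or_eq_true, List.any_eq_true, Bool.and_eq_true]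
                exact Or.inr ⟨q, PySem.List.mem_pyRange_one.mpr ⟨h0q, hqn⟩, hre,
                  hmem j (List.mem_cons_self ..)⟩
              · rw [hv, hqe]
                push_cast
                ring
        · rw [if_neg hpj]
          exact hent p hp0 hpn
      obtain ⟨I1, I2, I3, I4⟩ :=
        ih row' (fun x hx => hlb x (List.mem_cons_of_mem _ hx))
          (fun x hx => hmem x (List.mem_cons_of_mem _ hx)) hinv'
      have hfold : (j :: l).foldl (pvEdgeB q) row = l.foldl (pvEdgeB q) row' := by
        rw [List.foldl_cons, hstep]
      rw [hfold]
      have hq' : PySem.List.pyGetD row' q 0 = PySem.List.pyGetD row q 0 := by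
        rw [hget' q h0q, if_neg (fun h => hjq h.symm)]
      refine ⟨I1, ?_, ?_, ?_⟩
      · intro p hp0 hpn
        refine le_trans (I2 p hp0 hpn) ?_
        rw [hget' p hp0]
        by_cases hpj : p = j
        · rw [if_pos hpj, hpj]
          omega
        · rw [if_neg hpj]
      · rw [I3, hq']
      · intro x hx
        rcases List.mem_cons.mp hx with hx | hx
        · subst hx
          refine le_trans (I2 x hjb.1 hjb.2) ?_
          rw [hget' x hjb.1, if_pos rfl]
        · exact le_trans (I4 x hx) (by rw [hq'])
    · have hstep : pvEdgeB q row j = row := by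
        simp [pvEdgeB, hcond]
      obtain ⟨I1, I2, I3, I4⟩ :=
        ih row (fun x hx => hlb x (List.mem_cons_of_mem _ hx))
          (fun x hx => hmem x (List.mem_cons_of_mem _ hx)) ⟨hlen, hent⟩
      have hfold : (j :: l).foldl (pvEdgeB q) row = l.foldl (pvEdgeB q) row := by
        rw [List.foldl_cons, hstep]
      rw [hfold]
      refine ⟨I1, I2, I3, ?_⟩
      intro x hx
      rcases List.mem_cons.mp hx with hx | hx
      · subst hx
        refine le_trans (I2 x hjb.1 hjb.2) ?_
        omega
      · exact I4 x hx

lemma pvQsFold_facts (nbrs : List (List Int)) (n i : Int) (hNB : pvNB nbrs n) :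
    ∀ (qs : List Int) (row : List Int),
      (∀ q ∈ qs, 0 ≤ q ∧ q < n) →
      pvBInv nbrs n i row →
      pvBInv nbrs n i (qs.foldl (pvNodeB nbrs) row) ∧
      (∀ p : Int, 0 ≤ p → p < n →
        PySem.List.pyGetD (qs.foldl (pvNodeB nbrs) row) p 0 ≤ PySem.List.pyGetD row p 0) := by
  intro qs
  induction qs with
  | nil => exact fun row _ hinv => ⟨hinv, fun p _ _ => le_refl _⟩
  | cons q rest ih =>
    intro row hqb hinv
    obtain ⟨h0q, hqn⟩ := hqb q (List.mem_cons_self ..)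
    obtain ⟨l, hget, hlb⟩ := hNB q h0q hqn
    have hnode : pvNodeB nbrs row q = l.foldl (pvEdgeB q) row := by
      simp [pvNodeB, hget]
    have hmem : ∀ j ∈ l, ((PySem.List.pyGet? nbrs q).getD []).contains j = true := by
      intro j hj
      rw [hget]
      simpa using hj
    obtain ⟨I1, I2, _, _⟩ := pvEdgeFold_facts nbrs n i q h0q hqn l row hlb hmem hinv
    obtain ⟨J1, J2⟩ :=
      ih (l.foldl (pvEdgeB q) row) (fun x hx => hqb x (List.mem_cons_of_mem _ hx)) I1
    have hfold : (q :: rest).foldl (pvNodeB nbrs) row =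
        rest.foldl (pvNodeB nbrs) (l.foldl (pvEdgeB q) row) := by
      rw [List.foldl_cons, hnode]
    rw [hfold]
    exact ⟨J1, fun p hp0 hpn => le_trans (J2 p hp0 hpn) (I2 p hp0 hpn)⟩

lemma pvSweep_relax (nbrs : List (List Int)) (n i : Int) (hNB : pvNB nbrs n) (t : Nat)
    (row : List Int) (hinv : pvBInv nbrs n i row) (hcomp : pvComp nbrs n i t row) :
    pvComp nbrs n i (t + 1) ((PySem.List.pyRange 0 n 1).foldl (pvNodeB nbrs) row) := by
  have hrangeb : ∀ x ∈ PySem.List.pyRange 0 n 1, 0 ≤ x ∧ x < n := by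
    intro x hx
    exact PySem.List.mem_pyRange_one.mp hx
  intro j hj0 hjn e he hRe
  have hdecfull := (pvQsFold_facts nbrs n i hNB (PySem.List.pyRange 0 n 1) row hrangeb hinv).2
  by_cases het : e ≤ t
  · exact le_trans (hdecfull j hj0 hjn) (hcomp j hj0 hjn e het hRe)
  · have het1 : e = t + 1 := by omega
    subst het1
    simp only [pvR, Bool.or_eq_true, List.any_eq_true, Bool.and_eq_true] at hRe
    rcases hRe with hRe | ⟨q, hqr, hRq, hc⟩
    · refine le_trans (le_trans (hdecfull j hj0 hjn) (hcomp j hj0 hjn t (le_refl t) hRe)) ?_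
      push_cast
      omega
    · obtain ⟨h0q, hqn⟩ := PySem.List.mem_pyRange_one.mp hqr
      obtain ⟨l, hget, hlb⟩ := hNB q h0q hqn
      rw [hget] at hc
      have hjl : j ∈ l := by simpa using hc
      obtain ⟨l1, l2, hsplit⟩ := List.append_of_mem hqr
      have hl1b : ∀ x ∈ l1, 0 ≤ x ∧ x < n := by
        intro x hx
        exact hrangeb x (by rw [hsplit]; exact List.mem_append_left _ hx)
      have hl2b : ∀ x ∈ l2, 0 ≤ x ∧ x < n := by
        intro x hx
        exact hrangeb x (by rw [hsplit]; exact List.mem_append_right _ (List.mem_cons_of_mem _ hx))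
      obtain ⟨K1, K2⟩ := pvQsFold_facts nbrs n i hNB l1 row hl1b hinv
      set row1 := l1.foldl (pvNodeB nbrs) row with hrow1
      have hnode : pvNodeB nbrs row1 q = l.foldl (pvEdgeB q) row1 := by
        simp [pvNodeB, hget]
      have hmem : ∀ x ∈ l, ((PySem.List.pyGet? nbrs q).getD []).contains x = true := by
        intro x hx
        rw [hget]
        simpa using hx
      obtain ⟨E1, E2, E3, E4⟩ := pvEdgeFold_facts nbrs n i q h0q hqn l row1 hlb hmem K1
      set row2 := l.foldl (pvEdgeB q) row1 with hrow2
      obtain ⟨F1, F2⟩ := pvQsFold_facts nbrs n i hNB l2 row2 hl2b E1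
      have hfold : (PySem.List.pyRange 0 n 1).foldl (pvNodeB nbrs) row =
          l2.foldl (pvNodeB nbrs) row2 := by
        rw [hsplit, List.foldl_append, List.foldl_cons, hnode]
      rw [hfold]
      have h1 : PySem.List.pyGetD row1 q 0 ≤ (t : Int) :=
        le_trans (K2 q h0q hqn) (hcomp q h0q hqn t (le_refl t) hRq)
      have h2 : PySem.List.pyGetD row2 j 0 ≤ PySem.List.pyGetD row1 q 0 + 1 := E4 j hjl
      have h3 : PySem.List.pyGetD (l2.foldl (pvNodeB nbrs) row2) j 0 ≤
          PySem.List.pyGetD row2 j 0 := F2 j hj0 hjn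
      push_cast
      omega

lemma pvRounds_facts (nbrs : List (List Int)) (n i : Int) (hNB : pvNB nbrs n) :
    ∀ (qs : List Int) (row : List Int) (t : Nat),
      pvBInv nbrs n i row → pvComp nbrs n i t row →
      pvBInv nbrs n i
        (qs.foldl (fun r _ => (PySem.List.pyRange 0 n 1).foldl (pvNodeB nbrs) r) row) ∧
      pvComp nbrs n i (t + qs.length)
        (qs.foldl (fun r _ => (PySem.List.pyRange 0 n 1).foldl (pvNodeB nbrs) r) row) := by
  intro qs
  induction qs with
  | nil => exact fun row t h1 h2 => ⟨h1, by simpa using h2⟩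
  | cons q rest ih =>
    intro row t hinv hcomp
    have hrangeb : ∀ x ∈ PySem.List.pyRange 0 n 1, 0 ≤ x ∧ x < n := by
      intro x hx
      exact PySem.List.mem_pyRange_one.mp hx
    have hinv1 := (pvQsFold_facts nbrs n i hNB (PySem.List.pyRange 0 n 1) row hrangeb hinv).1
    have hcomp1 := pvSweep_relax nbrs n i hNB t row hinv hcomp
    obtain ⟨J1, J2⟩ := ih ((PySem.List.pyRange 0 n 1).foldl (pvNodeB nbrs) row) (t + 1) hinv1 hcomp1
    constructor
    · exact J1
    · have : t + (q :: rest).length = (t + 1) + rest.length := by simp; omega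
      rw [this]
      exact J2

-- stabilization: every reachable node is reachable within n.toNat levels
lemma pvR_stable_closure (nbrs : List (List Int)) (n i : Int) (d : Nat)
    (hst : ∀ x, pvR nbrs n i (d + 1) x = true → pvR nbrs n i d x = true) :
    ∀ (m : Nat) (x : Int), pvR nbrs n i (d + m) x = true → pvR nbrs n i d x = true := by
  intro m
  induction m with
  | zero => exact fun x h => h
  | succ m ih =>
    intro x hx
    have hx' : pvR nbrs n i (d + m + 1) x = true := hx
    simp only [pvR, Bool.or_eq_true, List.any_eq_true, Bool.and_eq_true] at hx'
    rcases hx' with hx' | ⟨q, hq, hRq, hc⟩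
    · exact ih x hx'
    · have hq' : pvR nbrs n i d q = true := ih q hRq
      have : pvR nbrs n i (d + 1) x = true := by
        simp only [pvR, Bool.or_eq_true, List.any_eq_true, Bool.and_eq_true]
        exact Or.inr ⟨q, hq, hq', hc⟩
      exact hst x this

lemma pvR_cap (nbrs : List (List Int)) (n i : Int) (hNB : pvNB nbrs n)
    (h0i : 0 ≤ i) (hin : i < n) :
    ∀ (e : Nat) (j : Int), pvR nbrs n i e j = true →
      ∃ e' ≤ n.toNat, pvR nbrs n i e' j = true := by
  have hmono : ∀ d : Nat,
      (Finset.range n.toNat).filter (fun k : Nat => pvR nbrs n i d (k : Int) = true) ⊆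
      (Finset.range n.toNat).filter (fun k : Nat => pvR nbrs n i (d + 1) (k : Int) = true) := by
    intro d k hk
    simp only [Finset.mem_filter] at hk ⊢
    exact ⟨hk.1, pvR_le nbrs n i (Nat.le_succ d) hk.2⟩
  have hcard : ∀ d : Nat,
      ((Finset.range n.toNat).filter (fun k : Nat => pvR nbrs n i d (k : Int) = true)).card ≤
        n.toNat := by
    intro d
    exact le_trans (Finset.card_filter_le _ _) (by simp)
  have lem3 : ∀ d : Nat,
      (∃ e ≤ d, ∀ x : Int, pvR nbrs n i (e + 1) x = true → pvR nbrs n i e x = true) ∨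
      d + 1 ≤ ((Finset.range n.toNat).filter
        (fun k : Nat => pvR nbrs n i d (k : Int) = true)).card := by
    intro d
    induction d with
    | zero =>
      refine Or.inr ?_
      have : i.toNat ∈ (Finset.range n.toNat).filter
          (fun k : Nat => pvR nbrs n i 0 (k : Int) = true) := by
        simp only [Finset.mem_filter, Finset.mem_range]
        constructor
        · omega
        · have : ((i.toNat : Nat) : Int) = i := by omega
          simp [pvR, this]
      have := Finset.card_pos.mpr ⟨i.toNat, this⟩
      omega
    | succ d ih =>
      rcases ih with ⟨e, he, hs⟩ | hc
      · exact Or.inl ⟨e, by omega, hs⟩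
      · by_cases hstable : ∀ x : Int, pvR nbrs n i (d + 1) x = true → pvR nbrs n i d x = true
        · exact Or.inl ⟨d, by omega, hstable⟩
        · push Not at hstable
          obtain ⟨x, hx1, hx2⟩ := hstable
          obtain ⟨hx0, hxn⟩ := pvR_bound nbrs n i hNB h0i hin (d + 1) x hx1
          have hxc : ((x.toNat : Nat) : Int) = x := by omega
          have hwit : x.toNat ∈ (Finset.range n.toNat).filter
              (fun k : Nat => pvR nbrs n i (d + 1) (k : Int) = true) := by
            simp only [Finset.mem_filter, Finset.mem_range, hxc]
            exact ⟨by omega, hx1⟩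
          have hnwit : x.toNat ∉ (Finset.range n.toNat).filter
              (fun k : Nat => pvR nbrs n i d (k : Int) = true) := by
            simp only [Finset.mem_filter, Finset.mem_range, hxc]
            exact fun h => hx2 h.2
          have hss := (Finset.ssubset_iff_of_subset (hmono d)).mpr ⟨x.toNat, hwit, hnwit⟩
          have := Finset.card_lt_card hss
          omega
  rcases lem3 n.toNat with ⟨e, he, hs⟩ | hc
  · intro e0 j hj
    by_cases h : e0 ≤ e
    · exact ⟨e, he, pvR_le nbrs n i h hj⟩
    · obtain ⟨m, rfl⟩ : ∃ m, e0 = e + m := ⟨e0 - e, by omega⟩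
      exact ⟨e, he, pvR_stable_closure nbrs n i e hs m j hj⟩
  · exact absurd hc (by have := hcard n.toNat; omega)

lemma pvBF_invfinal (nbrs : List (List Int)) (n i : Int) (hNB : pvNB nbrs n)
    (h0i : 0 ≤ i) (hin : i < n) :
    pvBInv nbrs n i
      ((PySem.List.pyRange 0 n 1).foldl (fun row _ =>
          (PySem.List.pyRange 0 n 1).foldl (pvNodeB nbrs) row)
        (PySem.List.pySetD (List.replicate n.toNat n) i 0)) ∧
    pvComp nbrs n i n.toNat
      ((PySem.List.pyRange 0 n 1).foldl (fun row _ =>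
          (PySem.List.pyRange 0 n 1).foldl (pvNodeB nbrs) row)
        (PySem.List.pySetD (List.replicate n.toNat n) i 0)) := by
  have hn0 : 0 < n := lt_of_le_of_lt h0i hin
  set row0 := PySem.List.pySetD (List.replicate n.toNat n) i 0 with hrow0
  have hreplen : ((List.replicate n.toNat n).length : Int) = (n.toNat : Int) := by simp
  have hilen : i < ((List.replicate n.toNat n).length : Int) := by rw [hreplen]; omega
  have hlen0 : row0.length = n.toNat := by
    rw [hrow0, PySem.List.length_pySetD, List.length_replicate]
  have hget0 : ∀ p : Int, 0 ≤ p → p < n →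
      PySem.List.pyGetD row0 p 0 = if p = i then 0 else n := by
    intro p hp0 hpn
    rw [hrow0, pvGetSet (List.replicate n.toNat n) i p 0 h0i hilen hp0]
    by_cases hpi : p = i
    · rw [if_pos hpi, if_pos hpi]
    · rw [if_neg hpi, if_neg hpi, pvGetD_nonneg _ _ _ hp0, List.getD_eq_getElem?_getD,
        List.getElem?_replicate, if_pos (by omega)]
      rfl
  have hinv0 : pvBInv nbrs n i row0 := by
    refine ⟨hlen0, ?_⟩
    intro j hj0 hjn
    rw [hget0 j hj0 hjn]
    by_cases hji : j = i
    · rw [if_pos hji]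
      refine ⟨by omega, Or.inr ⟨0, ?_, by simp⟩⟩
      simp [pvR, hji]
    · rw [if_neg hji]
      exact ⟨le_refl n, Or.inl rfl⟩
  have hcomp0 : pvComp nbrs n i 0 row0 := by
    intro j hj0 hjn e he hRe
    interval_cases e
    simp only [pvR, beq_iff_eq] at hRe
    subst hRe
    rw [hget0 j hj0 hjn, if_pos rfl]
    simp
  obtain ⟨H1, H2⟩ := pvRounds_facts nbrs n i hNB (PySem.List.pyRange 0 n 1) row0 0 hinv0 hcomp0
  refine ⟨H1, ?_⟩
  have hql : (PySem.List.pyRange 0 n 1).length = n.toNat := by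
    rw [PySem.List.length_pyRange_one]
    simp
  rw [hql] at H2
  simpa using H2

lemma pvBF_out (nbrs : List (List Int)) (n i : Int) (hNB : pvNB nbrs n)
    (h0i : 0 ≤ i) (hin : i < n) :
    ∀ j : Int, 0 ≤ j → j < n →
      pvOut nbrs n i
        ((PySem.List.pyRange 0 n 1).foldl (fun row _ =>
            (PySem.List.pyRange 0 n 1).foldl (pvNodeB nbrs) row)
          (PySem.List.pySetD (List.replicate n.toNat n) i 0)) j := by
  obtain ⟨⟨hlenf, hsnd⟩, hcomp⟩ := pvBF_invfinal nbrs n i hNB h0i hin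
  have hn0 : 0 < n := lt_of_le_of_lt h0i hin
  intro j hj0 hjn
  set res := (PySem.List.pyRange 0 n 1).foldl (fun row _ =>
      (PySem.List.pyRange 0 n 1).foldl (pvNodeB nbrs) row)
    (PySem.List.pySetD (List.replicate n.toNat n) i 0) with hres
  by_cases hex : ∃ e : Nat, pvR nbrs n i e j = true
  · obtain ⟨ew, hew⟩ := hex
    have hex : ∃ e : Nat, pvR nbrs n i e j = true := ⟨ew, hew⟩
    obtain ⟨e', he', hRe'⟩ := pvR_cap nbrs n i hNB h0i hin ew j hew
    have hfind_le : Nat.find hex ≤ e' := Nat.find_min' hex hRe'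
    have hcap : Nat.find hex ≤ n.toNat := le_trans hfind_le he'
    have hcompj : PySem.List.pyGetD res j 0 ≤ (Nat.find hex : Int) :=
      hcomp j hj0 hjn (Nat.find hex) hcap (Nat.find_spec hex)
    have hcast : ((Nat.find hex : Nat) : Int) ≤ n := by omega
    refine Or.inr ⟨Nat.find hex, fun e' he'' => Nat.find_min hex he'', Nat.find_spec hex, ?_⟩
    rcases (hsnd j hj0 hjn).2 with hn | ⟨e, hre, hveq⟩
    · omega
    · have : Nat.find hex ≤ e := Nat.find_min' hex hre
      rw [hveq]
      have : ((Nat.find hex : Nat) : Int) ≤ (e : Int) := by exact_mod_cast this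
      omega
  · push Not at hex
    refine Or.inl ⟨fun e => by simpa using hex e, ?_⟩
    rcases (hsnd j hj0 hjn).2 with hn | ⟨e, hre, _⟩
    · exact hn
    · exact absurd hre (by simpa using hex e)

lemma pvBF_length (nbrs : List (List Int)) (n i : Int) (hNB : pvNB nbrs n)
    (h0i : 0 ≤ i) (hin : i < n) :
    ((PySem.List.pyRange 0 n 1).foldl (fun row _ =>
        (PySem.List.pyRange 0 n 1).foldl (pvNodeB nbrs) row)
      (PySem.List.pySetD (List.replicate n.toNat n) i 0)).length = n.toNat := by
  exact (pvBF_invfinal nbrs n i hNB h0i hin).1.1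

-- ===== VERDICT (by name: the statement is the Claim_ definition above) =====
theorem construct_device_distance_matrix_spec : Claim_equal_construct_device_distance_matrix := by
  unfold Claim_equal_construct_device_distance_matrix
  intro nbrs n _ hpre
  unfold Spec_construct_device_distance_matrix
  have hNB := pvNB_of_pre hpre
  have hcrep : (PySem.List.pyRange 0 n 1).map (fun _ => n) = List.replicate n.toNat n := by
    rw [List.map_const']
    congr 1
    simp [PySem.List.length_pyRange_one]
  have hm0len : ((PySem.List.pyRange 0 n 1).map
      (fun _ => (PySem.List.pyRange 0 n 1).map (fun _ => n))).length = n.toNat := by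
    simp [PySem.List.length_pyRange_one]
  have hm0get : ∀ j : Nat, (0 : Int) ≤ (j : Int) → j < n.toNat →
      ((PySem.List.pyRange 0 n 1).map
        (fun _ => (PySem.List.pyRange 0 n 1).map (fun _ => n)))[j]? =
        some ((PySem.List.pyRange 0 n 1).map (fun _ => n)) := by
    intro j _ hj
    rw [List.getElem?_map,
      List.getElem?_eq_getElem (by simp [PySem.List.length_pyRange_one]; omega)]
    rfl
  have hA := pvFoldSet n
    (fun i r => pvRunA nbrs (n.toNat + 1) PySem.Set.empty [i] (PySem.List.pySetD r i 0))
    ((PySem.List.pyRange 0 n 1).map (fun _ => n)) n.toNat 0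
    ((PySem.List.pyRange 0 n 1).map (fun _ => (PySem.List.pyRange 0 n 1).map (fun _ => n)))
    (le_refl 0) (by simp) hm0len hm0get
  have hAeq : construct_device_distance_matrix nbrs n =
      (PySem.List.pyRange 0 n 1).map (fun i =>
        pvRunA nbrs (n.toNat + 1) PySem.Set.empty [i]
          (PySem.List.pySetD ((PySem.List.pyRange 0 n 1).map (fun _ => n)) i 0)) := by
    unfold construct_device_distance_matrix
    simpa using hA
  have hBeq : construct_device_distance_matrix_alt nbrs n =
      (PySem.List.pyRange 0 n 1).map (fun i =>
        (PySem.List.pyRange 0 n 1).foldl (fun row _ =>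
            (PySem.List.pyRange 0 n 1).foldl (pvNodeB nbrs) row)
          (PySem.List.pySetD (List.replicate n.toNat n) i 0)) := by
    unfold construct_device_distance_matrix_alt
    rw [PySem.List.foldl_append_singleton_eq_map]
    simp
  rw [hAeq, hBeq, hcrep]
  refine List.map_congr_left ?_
  intro i hi
  obtain ⟨h0i, hin⟩ := PySem.List.mem_pyRange_one.mp hi
  have hn0 : 0 < n := lt_of_le_of_lt h0i hin
  rw [pvRow_eq nbrs n hNB i h0i hin]
  set row0 := PySem.List.pySetD (List.replicate n.toNat n) i 0 with hrow0
  have hreplen : i < ((List.replicate n.toNat n).length : Int) := by simp; omega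
  have hlen0 : row0.length = n.toNat := by
    rw [hrow0, PySem.List.length_pySetD, List.length_replicate]
  have hget0 : ∀ p : Int, 0 ≤ p → p < n →
      PySem.List.pyGetD row0 p 0 = if p = i then 0 else n := by
    intro p hp0 hpn
    rw [hrow0, pvGetSet (List.replicate n.toNat n) i p 0 h0i hreplen hp0]
    by_cases hpi : p = i
    · rw [if_pos hpi, if_pos hpi]
    · rw [if_neg hpi, if_neg hpi, pvGetD_nonneg _ _ _ hp0, List.getD_eq_getElem?_getD,
        List.getElem?_replicate, if_pos (by omega)]
      rfl
  have hofl : PySem.Set.ofList [i] = [i] := rfl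
  have hOutA : ∀ j : Int, 0 ≤ j → j < n →
      pvOut nbrs n i (pvRunB nbrs (n.toNat + 1) [i] [i] ((0 : Nat) : Int) row0) j := by
    refine pvLvl_correct nbrs n i hNB h0i hin (n.toNat + 1) 0 [i] [i] row0
      (List.nodup_singleton i) ?_ ?_ ?_ ?_ hlen0 (by simp)
    · intro x
      simp [pvR]
    · intro x
      constructor
      · intro hx
        simp only [List.mem_singleton] at hx
        subst hx
        exact ⟨by simp [pvR], fun e he => absurd he (by omega)⟩
      · rintro ⟨hx, _⟩
        simp only [pvR, beq_iff_eq] at hx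
        simp [hx]
    · intro q hq hnq
      exact absurd hq hnq
    · intro j hj0 hjn
      constructor
      · intro hRj
        simp only [pvR, beq_iff_eq] at hRj
        subst hRj
        refine ⟨0, fun e' he' => absurd he' (by omega), by simp [pvR], ?_⟩
        rw [hget0 j hj0 hjn, if_pos rfl]
        rfl
      · intro hRj
        simp only [pvR, beq_iff_eq] at hRj
        rw [hget0 j hj0 hjn, if_neg hRj]
  have hOutB := pvBF_out nbrs n i hNB h0i hin
  have hlenA : (pvRunB nbrs (n.toNat + 1) [i] [i] (0 : Int) row0).length = n.toNat := by
    rw [pvRunB_length, hlen0]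
  have hlenB := pvBF_length nbrs n i hNB h0i hin
  simp only [Nat.cast_zero] at hOutA hlenA
  rw [hofl]
  apply List.ext_getElem (by rw [hlenA, hlenB])
  intro k hk1 hk2
  have hk : k < n.toNat := by rw [hlenA] at hk1; exact hk1
  have hkb1 : (0 : Int) ≤ (k : Int) := by omega
  have hkb2 : (k : Int) < n := by omega
  have hu := pvOut_unique (hOutA (k : Int) hkb1 hkb2) (hOutB (k : Int) hkb1 hkb2)
  have hgA : PySem.List.pyGetD (pvRunB nbrs (n.toNat + 1) [i] [i] 0 row0)
      (k : Int) 0 = (pvRunB nbrs (n.toNat + 1) [i] [i] 0 row0)[k]'hk1 := by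
    rw [PySem.List.pyGetD_natCast, List.getD_eq_getElem?_getD, List.getElem?_eq_getElem hk1]
    rfl
  have hgB : PySem.List.pyGetD ((PySem.List.pyRange 0 n 1).foldl (fun row _ =>
      (PySem.List.pyRange 0 n 1).foldl (pvNodeB nbrs) row) row0) (k : Int) 0 =
      ((PySem.List.pyRange 0 n 1).foldl (fun row _ =>
      (PySem.List.pyRange 0 n 1).foldl (pvNodeB nbrs) row) row0)[k]'hk2 := by
    rw [PySem.List.pyGetD_natCast, List.getD_eq_getElem?_getD, List.getElem?_eq_getElem hk2]
    rfl
  rw [← hgA, ← hgB]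
  exact hu
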